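-- pv_equiv track=rewrite | github.com/raeez/chiral-bar-cobar | compute/lib/theorem_thm_c_cy_rectification_engine.py | _sl2_vacuum_dim
-- ===== SOURCE A (Python) =====
-- def _sl2_vacuum_dim(n):
--     r"""Dimension of weight-n subspace of V_k(sl_2) vacuum module.
--
--     States: ordered monomials in J^+_{-m}, J^-_{-m}, J^0_{-m} for m >= 1.
--     Equivalent to 3-colored partitions of n.
--     """
--     # Generate 3-colored partitions of n
--     # A 3-colored partition: choose how many of each color at each mode level
--     if n == 0:
--         return 1
--
--     # Use generating function: prod_{m>=1} 1/(1-x^m)^3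
--     # Coefficient of x^n = dim
--     coeffs = [0] * (n + 1)
--     coeffs[0] = 1
--     for m in range(1, n + 1):
--         for _ in range(3):  # 3 colors
--             for j in range(m, n + 1):
--                 coeffs[j] += coeffs[j - m]
--     return coeffs[n]
-- ===== SOURCE B (Python) =====
-- def _sl2_vacuum_dim(n):
--     # One pass per mode m, using the binomial expansion
--     # (1 - x^m)^3 = 1 - 3x^m + 3x^(2m) - x^(3m):
--     # multiplying the series by 1/(1-x^m)^3 in a single sweep,
--     # instead of A's three separate prefix-sum passes (one per color).
--     c = [0] * (n + 1)
--     c[0] = 1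
--     for m in range(1, n + 1):
--         for j in range(m, n + 1):
--             v = c[j] + 3 * c[j - m]
--             if j >= 2 * m:
--                 v -= 3 * c[j - 2 * m]
--             if j >= 3 * m:
--                 v += c[j - 3 * m]
--             c[j] = v
--     return c[n]
-- ===== Notes on version B (the rewrite author's own statement) =====
-- stated objective: alternative
-- what changed: Replaces A's three separate prefix-sum passes per mode m (one per color, dividing by (1-x^m) three times) by a single sweep per mode that multiplies by the full cube inverse directly, using the binomial expansion of (1-x^m)^3 as a third-order recurrence, and B needs no special base-case guard.
import Mathlib
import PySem

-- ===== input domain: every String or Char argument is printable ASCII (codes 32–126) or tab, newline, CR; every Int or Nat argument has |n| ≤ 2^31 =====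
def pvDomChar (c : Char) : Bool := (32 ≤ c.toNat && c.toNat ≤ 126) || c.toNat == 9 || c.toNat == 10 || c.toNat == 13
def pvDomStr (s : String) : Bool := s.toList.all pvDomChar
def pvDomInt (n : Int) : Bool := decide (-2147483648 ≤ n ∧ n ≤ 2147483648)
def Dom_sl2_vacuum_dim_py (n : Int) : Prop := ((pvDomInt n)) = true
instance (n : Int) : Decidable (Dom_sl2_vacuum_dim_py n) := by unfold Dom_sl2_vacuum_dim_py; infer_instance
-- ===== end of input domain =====

-- B replaces A's three prefix-sum passes per mode m (one per color) by a single sweep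
-- multiplying by 1/(1-x^m)^3 directly, via (1-x^m)^3 = 1-3x^m+3x^(2m)-x^(3m); objective: alternative.

-- ===== PORT A =====
def sl2_vacuum_dim_py (n : Int) : Int :=
  if n = 0 then 1
  else
    let coeffs := PySem.List.pyRepeat [(0 : Int)] (n + 1)
    let coeffs := PySem.List.pySetD coeffs 0 1
    let coeffs := (PySem.List.pyRange 1 (n + 1) 1).foldl (fun c m =>
      (PySem.List.pyRange 0 3 1).foldl (fun c _ =>
        (PySem.List.pyRange m (n + 1) 1).foldl (fun c j =>
          PySem.List.pySetD c j (PySem.List.pyGetD c j 0 + PySem.List.pyGetD c (j - m) 0)) c) c) coeffs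
    PySem.List.pyGetD coeffs n 0

-- ===== PORT B =====
def sl2_vacuum_dim_py_alt (n : Int) : Int :=
  let coeffs := PySem.List.pySetD (PySem.List.pyRepeat [(0 : Int)] (n + 1)) 0 1
  let coeffs := (PySem.List.pyRange 1 (n + 1) 1).foldl (fun c m =>
      (PySem.List.pyRange m (n + 1) 1).foldl (fun c j =>
        let v := PySem.List.pyGetD c j 0 + 3 * PySem.List.pyGetD c (j - m) 0
        let v := if 2 * m ≤ j then v - 3 * PySem.List.pyGetD c (j - 2 * m) 0 else v
        let v := if 3 * m ≤ j then v + PySem.List.pyGetD c (j - 3 * m) 0 else v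
        PySem.List.pySetD c j v) c) coeffs
  PySem.List.pyGetD coeffs n 0

-- ===== PRECONDITION & SPEC =====
-- Pre_ excludes negative n, on which A raises IndexError (the coefficient list is empty and its first assignment fails).
def Pre_sl2_vacuum_dim_py (n : Int) : Prop := 0 ≤ n
instance (n : Int) : Decidable (Pre_sl2_vacuum_dim_py n) := by unfold Pre_sl2_vacuum_dim_py; infer_instance
def pvWitness_sl2_vacuum_dim_py : Int := 4

def Spec_sl2_vacuum_dim_py (n : Int) (out : Int) : Prop := out = sl2_vacuum_dim_py_alt n
instance (n : Int) (out : Int) : Decidable (Spec_sl2_vacuum_dim_py n out) := by unfold Spec_sl2_vacuum_dim_py; infer_instance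

-- ===== CLAIM (what is proved, stated in full; the proofs are below) =====
def Claim_equal_sl2_vacuum_dim_py : Prop := ∀ (n : Int), Dom_sl2_vacuum_dim_py n → Pre_sl2_vacuum_dim_py n → Spec_sl2_vacuum_dim_py n (sl2_vacuum_dim_py n)

-- ===== LEMMAS AND PROOFS =====

-- entries of a coefficient list, as a function (default 0)
def pvF (c : List Int) (i : Nat) : Int := c.getD i 0

-- mathematical model of one in-place pass "for j in range(m, ...): c[j] += c[j-m]"
def pvG (m : Nat) (f : Nat → Int) (j : Nat) : Int :=
  if h : 0 < m ∧ m ≤ j then f j + pvG m f (j - m) else f j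
termination_by j
decreasing_by omega

-- partial weighted sum: sum over t < T of w t * f (j - t*m)
def pvWA (w : Nat → Int) (m : Nat) (f : Nat → Int) (j : Nat) : Nat → Int
  | 0 => 0
  | T + 1 => pvWA w m f j T + w T * f (j - T * m)

-- full weighted sum, t ranging over 0..j/m
def pvWS (w : Nat → Int) (m : Nat) (f : Nat → Int) (j : Nat) : Int :=
  pvWA w m f j (j / m + 1)

def pvW0 (t : Nat) : Int := if t = 0 then 1 else 0
def pvW1 (_ : Nat) : Int := 1
def pvW2 (t : Nat) : Int := (t : Int) + 1
def pvW3 (t : Nat) : Int := (((t + 1) * (t + 2) / 2 : Nat) : Int)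

theorem pvG_congr (m : Nat) (f g : Nat → Int) (j : Nat) (h : ∀ i ≤ j, f i = g i) :
    pvG m f j = pvG m g j := by
  induction j using Nat.strong_induction_on with
  | _ j ih =>
    conv_lhs => rw [pvG]
    conv_rhs => rw [pvG]
    split_ifs with hc
    · rw [h j le_rfl, ih (j - m) (by omega) (fun i hi => h i (by omega))]
    · exact h j le_rfl

theorem pvWS_delta (m : Nat) (f : Nat → Int) (j : Nat) : pvWS pvW0 m f j = f j := by
  have key : ∀ T, pvWA pvW0 m f j (T + 1) = f j := by
    intro T
    induction T with
    | zero => simp [pvWA, pvW0]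
    | succ T ih => rw [pvWA, ih]; simp [pvW0]
  exact key _

-- the shift identity on partial sums
theorem pvWA_shift (w w' : Nat → Int) (m : Nat) (f : Nat → Int) (j : Nat)
    (h0 : w' 0 = w 0) (hs : ∀ t, w' (t + 1) = w' t + w (t + 1)) (T : Nat) :
    pvWA w' m f j (T + 1) = pvWA w' m f (j - m) T + pvWA w m f j (T + 1) := by
  induction T with
  | zero => simp [pvWA, h0]
  | succ T ih =>
    have hsub : j - (T + 1) * m = j - m - T * m := by
      have : (T + 1) * m = m + T * m := by ring
      omega
    calc pvWA w' m f j (T + 2)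
        = pvWA w' m f j (T + 1) + w' (T + 1) * f (j - (T + 1) * m) := rfl
      _ = (pvWA w' m f (j - m) T + pvWA w m f j (T + 1))
            + (w' T + w (T + 1)) * f (j - (T + 1) * m) := by rw [ih, hs]
      _ = (pvWA w' m f (j - m) T + w' T * f (j - m - T * m))
            + (pvWA w m f j (T + 1) + w (T + 1) * f (j - (T + 1) * m)) := by rw [hsub]; ring
      _ = pvWA w' m f (j - m) (T + 1) + pvWA w m f j (T + 2) := rfl

-- one pass on the weighted sum raises the weight
theorem pvG_pvWS (w w' : Nat → Int) (m : Nat) (hm : 0 < m) (f : Nat → Int)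
    (h0 : w' 0 = w 0) (hs : ∀ t, w' (t + 1) = w' t + w (t + 1)) (j : Nat) :
    pvG m (pvWS w m f) j = pvWS w' m f j := by
  induction j using Nat.strong_induction_on with
  | _ j ih =>
    rw [pvG]
    by_cases hj : m ≤ j
    · rw [dif_pos ⟨hm, hj⟩, ih (j - m) (by omega)]
      have hdiv : j / m = (j - m) / m + 1 := Nat.div_eq_sub_div hm hj
      rw [pvWS, pvWS, pvWS, hdiv]
      rw [pvWA_shift w w' m f j h0 hs ((j - m) / m + 1)]
      ring
    · rw [dif_neg (by omega)]
      have hd : j / m = 0 := Nat.div_eq_of_lt (by omega)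
      simp [pvWS, hd, pvWA, h0]

theorem pvW3_two_mul (t : Nat) : 2 * ((t + 1) * (t + 2) / 2) = (t + 1) * (t + 2) := by
  have : 2 ∣ (t + 1) * (t + 2) := (Nat.even_mul_succ_self (t + 1)).two_dvd
  omega

theorem pvW3_succ (t : Nat) : pvW3 (t + 1) = pvW3 t + pvW2 (t + 1) := by
  unfold pvW3 pvW2
  have h1 := pvW3_two_mul t
  have h2 := pvW3_two_mul (t + 1)
  have : (t + 1 + 1) * (t + 1 + 2) / 2 = (t + 1) * (t + 2) / 2 + (t + 2) := by
    have e : (t + 1 + 1) * (t + 1 + 2) = (t + 1) * (t + 2) + 2 * (t + 2) := by ring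
    omega
  rw [this]
  push_cast
  ring

-- A's inner loop (one pass), characterised
theorem passA_spec (m N : Nat) (hm : 0 < m) (c : List Int) (hc : c.length = N) (b : Nat) (hb : b ≤ N) :
    ((PySem.List.pyRange (m : Int) (b : Int) 1).foldl (fun c j =>
        PySem.List.pySetD c j (PySem.List.pyGetD c j 0 + PySem.List.pyGetD c (j - (m : Int)) 0)) c).length = N ∧
    ∀ i, i < N →
      ((PySem.List.pyRange (m : Int) (b : Int) 1).foldl (fun c j =>
        PySem.List.pySetD c j (PySem.List.pyGetD c j 0 + PySem.List.pyGetD c (j - (m : Int)) 0)) c).getD i 0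
        = if i < b then pvG m (pvF c) i else pvF c i := by
  induction b with
  | zero =>
    rw [PySem.List.pyRange_one_eq_nil (by exact_mod_cast Nat.zero_le m)]
    exact ⟨hc, fun i _ => by simp [pvF]⟩
  | succ b ih =>
    by_cases hmb : m ≤ b
    · have hcast : ((b + 1 : Nat) : Int) = (b : Int) + 1 := by push_cast; ring
      rw [hcast, PySem.List.pyRange_one_succ_right (by exact_mod_cast hmb), List.foldl_append]
      obtain ⟨ihl, ihg⟩ := ih (by omega)
      set R := (PySem.List.pyRange (m : Int) (b : Int) 1).foldl (fun c j =>
        PySem.List.pySetD c j (PySem.List.pyGetD c j 0 + PySem.List.pyGetD c (j - (m : Int)) 0)) c with hR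
      simp only [List.foldl_cons, List.foldl_nil]
      have hbN : b < N := by omega
      have hbR : b < R.length := by omega
      have hgb : PySem.List.pyGetD R ((b : Nat) : Int) 0 = pvF c b := by
        rw [PySem.List.pyGetD_natCast]
        simpa using ihg b hbN
      have hsub : ((b : Int) - (m : Int)) = ((b - m : Nat) : Int) := by
        push_cast [Nat.cast_sub hmb]; ring
      have hgbm : PySem.List.pyGetD R ((b : Int) - (m : Int)) 0 = pvG m (pvF c) (b - m) := by
        rw [hsub, PySem.List.pyGetD_natCast]
        have := ihg (b - m) (by omega)
        rwa [if_pos (by omega)] at this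
      refine ⟨by rw [PySem.List.pySetD_natCast, List.length_set, ihl], ?_⟩
      intro i hi
      have hkey : (PySem.List.pySetD R ((b : Nat) : Int)
            (PySem.List.pyGetD R ((b : Nat) : Int) 0 + PySem.List.pyGetD R ((b : Int) - (m : Int)) 0)).getD i 0
          = if i = b
            then PySem.List.pyGetD R ((b : Nat) : Int) 0 + PySem.List.pyGetD R ((b : Int) - (m : Int)) 0
            else R.getD i 0 := by
        rw [← PySem.List.pyGetD_natCast _ i,
          PySem.List.pyGetD_pySetD_natCast R b i _ 0 hbR]
        split_ifs <;> simp
      rw [hkey]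
      have hstep : pvG m (pvF c) b = pvF c b + pvG m (pvF c) (b - m) := by
        rw [pvG]; rw [dif_pos ⟨hm, hmb⟩]
      by_cases hib : i = b
      · subst hib
        rw [if_pos rfl, if_pos (by omega), hgb, hgbm, hstep]
      · rw [if_neg hib]
        have hthis := ihg i hi
        by_cases hlt : i < b
        · rw [if_pos (show i < b + 1 by omega)]
          rw [if_pos hlt] at hthis
          exact hthis
        · rw [if_neg (show ¬ i < b + 1 by omega)]
          rw [if_neg hlt] at hthis
          exact hthis
    · rw [PySem.List.pyRange_one_eq_nil (by exact_mod_cast (by omega : b + 1 ≤ m))]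
      refine ⟨hc, fun i _ => ?_⟩
      simp only [List.foldl_nil]
      split_ifs with h
      · rw [pvG, dif_neg (by omega)]; rfl
      · rfl

-- the shift identity on full weighted sums
theorem pvWS_shift (w w' : Nat → Int) (m : Nat) (hm : 0 < m) (f : Nat → Int)
    (h0 : w' 0 = w 0) (hs : ∀ t, w' (t + 1) = w' t + w (t + 1)) (j : Nat) (hj : m ≤ j) :
    pvWS w' m f j = pvWS w' m f (j - m) + pvWS w m f j := by
  have hdiv : j / m = (j - m) / m + 1 := Nat.div_eq_sub_div hm hj
  rw [pvWS, pvWS, pvWS, hdiv]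
  rw [pvWA_shift w w' m f j h0 hs ((j - m) / m + 1)]

theorem pvWS_lt (w : Nat → Int) (m : Nat) (f : Nat → Int) (j : Nat) (hj : j < m) :
    pvWS w m f j = w 0 * f j := by
  have hd : j / m = 0 := Nat.div_eq_of_lt hj
  simp [pvWS, hd, pvWA]

theorem pvW1_zero : pvW1 0 = 1 := rfl
theorem pvW2_zero : pvW2 0 = 1 := by simp [pvW2]
theorem pvW3_zero : pvW3 0 = 1 := by decide

theorem pvWS3_shift (m : Nat) (hm : 0 < m) (f : Nat → Int) (j : Nat) (hj : m ≤ j) :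
    pvWS pvW3 m f j = pvWS pvW3 m f (j - m) + pvWS pvW2 m f j :=
  pvWS_shift pvW2 pvW3 m hm f (by rw [pvW3_zero, pvW2_zero]) pvW3_succ j hj

theorem pvWS2_shift (m : Nat) (hm : 0 < m) (f : Nat → Int) (j : Nat) (hj : m ≤ j) :
    pvWS pvW2 m f j = pvWS pvW2 m f (j - m) + pvWS pvW1 m f j :=
  pvWS_shift pvW1 pvW2 m hm f (by rw [pvW2_zero]; rfl)
    (fun t => by simp [pvW1, pvW2]) j hj

theorem pvWS1_shift (m : Nat) (hm : 0 < m) (f : Nat → Int) (j : Nat) (hj : m ≤ j) :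
    pvWS pvW1 m f j = pvWS pvW1 m f (j - m) + f j := by
  have := pvWS_shift pvW0 pvW1 m hm f (by simp [pvW0, pvW1]) (fun t => by simp [pvW0, pvW1]) j hj
  rwa [pvWS_delta] at this

-- the three recurrence cases for the weight C(t+2,2)
theorem pvW3_rec1 (m : Nat) (hm : 0 < m) (f : Nat → Int) (j : Nat) (h1 : m ≤ j) (h2 : j < 2 * m) :
    pvWS pvW3 m f j = f j + 3 * pvWS pvW3 m f (j - m) := by
  have e3 := pvWS3_shift m hm f j h1
  have e2 := pvWS2_shift m hm f j h1
  have e1 := pvWS1_shift m hm f j h1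
  have s3 := pvWS_lt pvW3 m f (j - m) (by omega)
  have s2 := pvWS_lt pvW2 m f (j - m) (by omega)
  have s1 := pvWS_lt pvW1 m f (j - m) (by omega)
  rw [pvW3_zero] at s3; rw [pvW2_zero] at s2; rw [pvW1_zero] at s1
  linarith

theorem pvW3_rec2 (m : Nat) (hm : 0 < m) (f : Nat → Int) (j : Nat) (h1 : 2 * m ≤ j) (h2 : j < 3 * m) :
    pvWS pvW3 m f j = f j + 3 * pvWS pvW3 m f (j - m) - 3 * pvWS pvW3 m f (j - 2 * m) := by
  have hmm : m ≤ j - m := by omega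
  have hsub : j - m - m = j - 2 * m := by omega
  have e3 := pvWS3_shift m hm f j (by omega)
  have e2 := pvWS2_shift m hm f j (by omega)
  have e1 := pvWS1_shift m hm f j (by omega)
  have e3' := pvWS3_shift m hm f (j - m) hmm
  have e2' := pvWS2_shift m hm f (j - m) hmm
  have e1' := pvWS1_shift m hm f (j - m) hmm
  rw [hsub] at e3' e2' e1'
  have s3 := pvWS_lt pvW3 m f (j - 2 * m) (by omega)
  have s2 := pvWS_lt pvW2 m f (j - 2 * m) (by omega)
  have s1 := pvWS_lt pvW1 m f (j - 2 * m) (by omega)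
  rw [pvW3_zero] at s3; rw [pvW2_zero] at s2; rw [pvW1_zero] at s1
  linarith

theorem pvW3_rec3 (m : Nat) (hm : 0 < m) (f : Nat → Int) (j : Nat) (h1 : 3 * m ≤ j) :
    pvWS pvW3 m f j = f j + 3 * pvWS pvW3 m f (j - m) - 3 * pvWS pvW3 m f (j - 2 * m)
      + pvWS pvW3 m f (j - 3 * m) := by
  have hsub2 : j - m - m = j - 2 * m := by omega
  have hsub3 : j - 2 * m - m = j - 3 * m := by omega
  have e3 := pvWS3_shift m hm f j (by omega)
  have e2 := pvWS2_shift m hm f j (by omega)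
  have e1 := pvWS1_shift m hm f j (by omega)
  have e3' := pvWS3_shift m hm f (j - m) (by omega)
  have e2' := pvWS2_shift m hm f (j - m) (by omega)
  rw [hsub2] at e3' e2'
  have e3'' := pvWS3_shift m hm f (j - 2 * m) (by omega)
  rw [hsub3] at e3''
  linarith

-- B's inner loop (one pass), characterised
theorem passB_spec (m N : Nat) (hm : 0 < m) (c : List Int) (hc : c.length = N) (b : Nat) (hb : b ≤ N) :
    ((PySem.List.pyRange (m : Int) (b : Int) 1).foldl (fun c j =>
        let v := PySem.List.pyGetD c j 0 + 3 * PySem.List.pyGetD c (j - (m : Int)) 0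
        let v := if 2 * (m : Int) ≤ j then v - 3 * PySem.List.pyGetD c (j - 2 * (m : Int)) 0 else v
        let v := if 3 * (m : Int) ≤ j then v + PySem.List.pyGetD c (j - 3 * (m : Int)) 0 else v
        PySem.List.pySetD c j v) c).length = N ∧
    ∀ i, i < N →
      ((PySem.List.pyRange (m : Int) (b : Int) 1).foldl (fun c j =>
        let v := PySem.List.pyGetD c j 0 + 3 * PySem.List.pyGetD c (j - (m : Int)) 0
        let v := if 2 * (m : Int) ≤ j then v - 3 * PySem.List.pyGetD c (j - 2 * (m : Int)) 0 else v
        let v := if 3 * (m : Int) ≤ j then v + PySem.List.pyGetD c (j - 3 * (m : Int)) 0 else v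
        PySem.List.pySetD c j v) c).getD i 0
        = if i < b then pvWS pvW3 m (pvF c) i else pvF c i := by
  induction b with
  | zero =>
    rw [PySem.List.pyRange_one_eq_nil (by exact_mod_cast Nat.zero_le m)]
    refine ⟨hc, fun i _ => ?_⟩
    simp only [List.foldl_nil]
    rfl
  | succ b ih =>
    by_cases hmb : m ≤ b
    · have hcast : ((b + 1 : Nat) : Int) = (b : Int) + 1 := by push_cast; ring
      rw [hcast, PySem.List.pyRange_one_succ_right (by exact_mod_cast hmb), List.foldl_append]
      obtain ⟨ihl, ihg⟩ := ih (by omega)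
      set R := (PySem.List.pyRange (m : Int) (b : Int) 1).foldl (fun c j =>
        let v := PySem.List.pyGetD c j 0 + 3 * PySem.List.pyGetD c (j - (m : Int)) 0
        let v := if 2 * (m : Int) ≤ j then v - 3 * PySem.List.pyGetD c (j - 2 * (m : Int)) 0 else v
        let v := if 3 * (m : Int) ≤ j then v + PySem.List.pyGetD c (j - 3 * (m : Int)) 0 else v
        PySem.List.pySetD c j v) c with hR
      simp only [List.foldl_cons, List.foldl_nil]
      have hbN : b < N := by omega
      have hbR : b < R.length := by omega
      -- the four reads
      have hgb : PySem.List.pyGetD R ((b : Nat) : Int) 0 = pvF c b := by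
        rw [PySem.List.pyGetD_natCast]
        simpa using ihg b hbN
      have hread : ∀ k : Nat, 0 < k → k * m ≤ b →
          PySem.List.pyGetD R ((b : Int) - k * (m : Int)) 0 = pvWS pvW3 m (pvF c) (b - k * m) := by
        intro k hk hkm
        have hidx : (b : Int) - (k : Int) * (m : Int) = ((b - k * m : Nat) : Int) := by
          push_cast [Nat.cast_sub hkm]; ring
        rw [hidx, PySem.List.pyGetD_natCast]
        have hkm0 : 0 < k * m := Nat.mul_pos hk hm
        have := ihg (b - k * m) (by omega)
        rwa [if_pos (by omega)] at this
      -- value written at b equals the full weighted sum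
      have hval :
          (let v := PySem.List.pyGetD R ((b : Nat) : Int) 0 + 3 * PySem.List.pyGetD R (((b : Nat) : Int) - (m : Int)) 0
           let v := if 2 * (m : Int) ≤ ((b : Nat) : Int) then v - 3 * PySem.List.pyGetD R (((b : Nat) : Int) - 2 * (m : Int)) 0 else v
           let v := if 3 * (m : Int) ≤ ((b : Nat) : Int) then v + PySem.List.pyGetD R (((b : Nat) : Int) - 3 * (m : Int)) 0 else v
           v) = pvWS pvW3 m (pvF c) b := by
        simp only []
        by_cases g3 : 3 * m ≤ b
        · have h1 := hread 1 (by omega) (by omega)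
          have h2 := hread 2 (by omega) (by omega)
          have h3 := hread 3 (by omega) g3
          simp only [Nat.cast_one, Nat.cast_ofNat, one_mul] at h1 h2 h3
          rw [if_pos (show (3 : Int) * (m : Int) ≤ ((b : Nat) : Int) by exact_mod_cast g3),
            if_pos (show (2 : Int) * (m : Int) ≤ ((b : Nat) : Int) by
              exact_mod_cast (show 2 * m ≤ b by omega))]
          rw [hgb, h1, h2, h3, pvW3_rec3 m hm (pvF c) b g3]
        · by_cases g2 : 2 * m ≤ b
          · have h1 := hread 1 (by omega) (by omega)
            have h2 := hread 2 (by omega) g2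
            simp only [Nat.cast_one, Nat.cast_ofNat, one_mul] at h1 h2
            rw [if_neg (show ¬ (3 : Int) * (m : Int) ≤ ((b : Nat) : Int) by
                rw [not_le]; exact_mod_cast (show b < 3 * m by omega)),
              if_pos (show (2 : Int) * (m : Int) ≤ ((b : Nat) : Int) by exact_mod_cast g2)]
            rw [hgb, h1, h2, pvW3_rec2 m hm (pvF c) b g2 (by omega)]
          · have h1 := hread 1 (by omega) (by omega)
            simp only [Nat.cast_one, one_mul] at h1
            rw [if_neg (show ¬ (3 : Int) * (m : Int) ≤ ((b : Nat) : Int) by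
                rw [not_le]; exact_mod_cast (show b < 3 * m by omega)),
              if_neg (show ¬ (2 : Int) * (m : Int) ≤ ((b : Nat) : Int) by
                rw [not_le]; exact_mod_cast (show b < 2 * m by omega))]
            rw [hgb, h1, pvW3_rec1 m hm (pvF c) b hmb (by omega)]
      refine ⟨?_, ?_⟩
      · rw [PySem.List.pySetD_natCast, List.length_set, ihl]
      · intro i hi
        have hkey : ∀ v : Int, (PySem.List.pySetD R ((b : Nat) : Int) v).getD i 0
            = if i = b then v else R.getD i 0 := by
          intro v
          rw [← PySem.List.pyGetD_natCast _ i, PySem.List.pyGetD_pySetD_natCast R b i v 0 hbR]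
          split_ifs <;> simp
        rw [hkey]
        by_cases hib : i = b
        · subst hib
          rw [if_pos rfl]
          have hrhs : (if i < i + 1 then pvWS pvW3 m (pvF c) i else pvF c i)
              = pvWS pvW3 m (pvF c) i := if_pos (by omega)
          rw [hrhs]
          exact hval
        · rw [if_neg hib]
          have hthis := ihg i hi
          by_cases hlt : i < b
          · rw [if_pos (show i < b + 1 by omega)]
            rw [if_pos hlt] at hthis
            exact hthis
          · rw [if_neg (show ¬ i < b + 1 by omega)]
            rw [if_neg hlt] at hthis
            exact hthis
    · rw [PySem.List.pyRange_one_eq_nil (by exact_mod_cast (by omega : b + 1 ≤ m))]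
      refine ⟨hc, fun i _ => ?_⟩
      simp only [List.foldl_nil]
      split_ifs with h
      · rw [pvWS_lt pvW3 m (pvF c) i (by omega), pvW3_zero, one_mul]; rfl
      · rfl

-- the two per-m passes produce equal lists
theorem pass_eq (n : Int) (hn : 0 ≤ n) (m : Int) (hm : 1 ≤ m) (c : List Int)
    (hc : c.length = (n + 1).toNat) :
    (PySem.List.pyRange 0 3 1).foldl (fun c _ =>
        (PySem.List.pyRange m (n + 1) 1).foldl (fun c j =>
          PySem.List.pySetD c j (PySem.List.pyGetD c j 0 + PySem.List.pyGetD c (j - m) 0)) c) c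
      = (PySem.List.pyRange m (n + 1) 1).foldl (fun c j =>
        let v := PySem.List.pyGetD c j 0 + 3 * PySem.List.pyGetD c (j - m) 0
        let v := if 2 * m ≤ j then v - 3 * PySem.List.pyGetD c (j - 2 * m) 0 else v
        let v := if 3 * m ≤ j then v + PySem.List.pyGetD c (j - 3 * m) 0 else v
        PySem.List.pySetD c j v) c := by
  set N : Nat := (n + 1).toNat with hN
  have hNn : ((N : Nat) : Int) = n + 1 := Int.toNat_of_nonneg (by omega)
  have hmN : ((m.toNat : Nat) : Int) = m := Int.toNat_of_nonneg (by omega)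
  set mN : Nat := m.toNat with hmNdef
  have hm0 : 0 < mN := by omega
  rw [← hNn, ← hmN]
  rw [show PySem.List.pyRange 0 3 1 = [0, 1, 2] by decide]
  simp only [List.foldl_cons, List.foldl_nil]
  obtain ⟨hl1, hg1⟩ := passA_spec mN N hm0 c hc N le_rfl
  set A1 := (PySem.List.pyRange (mN : Int) (N : Int) 1).foldl (fun c j =>
    PySem.List.pySetD c j (PySem.List.pyGetD c j 0 + PySem.List.pyGetD c (j - (mN : Int)) 0)) c with hA1
  obtain ⟨hl2, hg2⟩ := passA_spec mN N hm0 A1 hl1 N le_rfl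
  set A2 := (PySem.List.pyRange (mN : Int) (N : Int) 1).foldl (fun c j =>
    PySem.List.pySetD c j (PySem.List.pyGetD c j 0 + PySem.List.pyGetD c (j - (mN : Int)) 0)) A1 with hA2
  obtain ⟨hl3, hg3⟩ := passA_spec mN N hm0 A2 hl2 N le_rfl
  set A3 := (PySem.List.pyRange (mN : Int) (N : Int) 1).foldl (fun c j =>
    PySem.List.pySetD c j (PySem.List.pyGetD c j 0 + PySem.List.pyGetD c (j - (mN : Int)) 0)) A2 with hA3
  have h1 : ∀ i, i < N → pvF A1 i = pvWS pvW1 mN (pvF c) i := by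
    intro i hi
    have := hg1 i hi
    rw [if_pos hi] at this
    rw [pvF, this,
      pvG_congr mN (pvF c) (pvWS pvW0 mN (pvF c)) i (fun k _ => (pvWS_delta mN (pvF c) k).symm)]
    exact pvG_pvWS pvW0 pvW1 mN hm0 (pvF c) (by simp [pvW0, pvW1])
      (fun t => by simp [pvW0, pvW1]) i
  have h2 : ∀ i, i < N → pvF A2 i = pvWS pvW2 mN (pvF c) i := by
    intro i hi
    have := hg2 i hi
    rw [if_pos hi] at this
    rw [pvF, this, pvG_congr mN (pvF A1) (pvWS pvW1 mN (pvF c)) i (fun k hk => h1 k (by omega))]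
    exact pvG_pvWS pvW1 pvW2 mN hm0 (pvF c) (by simp [pvW1, pvW2])
      (fun t => by simp [pvW1, pvW2]) i
  have h3 : ∀ i, i < N → pvF A3 i = pvWS pvW3 mN (pvF c) i := by
    intro i hi
    have := hg3 i hi
    rw [if_pos hi] at this
    rw [pvF, this, pvG_congr mN (pvF A2) (pvWS pvW2 mN (pvF c)) i (fun k hk => h2 k (by omega))]
    exact pvG_pvWS pvW2 pvW3 mN hm0 (pvF c) (by simp [pvW2, pvW3])
      (fun t => pvW3_succ t) i
  obtain ⟨hlB, hgB⟩ := passB_spec mN N hm0 c hc N le_rfl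
  apply List.ext_getElem (by rw [hl3, hlB])
  intro i hi1 hi2
  have hiN : i < N := by omega
  calc A3[i] = A3.getD i 0 := (List.getD_eq_getElem A3 0 hi1).symm
    _ = pvWS pvW3 mN (pvF c) i := by rw [← pvF]; exact h3 i hiN
    _ = _ := by
        have := hgB i hiN
        rw [if_pos hiN] at this
        rw [← this]
        exact List.getD_eq_getElem _ 0 hi2

theorem foldl_eq_of_inv {α β : Type} (L : List β) (P : α → Prop) (fA fB : α → β → α)
    (h : ∀ b ∈ L, ∀ x, P x → fA x b = fB x b ∧ P (fA x b)) :
    ∀ x, P x → L.foldl fA x = L.foldl fB x := by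
  induction L with
  | nil => intro x _; rfl
  | cons b L ih =>
    intro x hx
    have hb := h b (by simp) x hx
    simp only [List.foldl_cons, hb.1]
    exact ih (fun b' hb' => h b' (by simp [hb'])) _ (hb.1 ▸ hb.2)

-- ===== VERDICT (by name: the statement is the Claim_ definition above) =====
theorem sl2_vacuum_dim_py_spec : Claim_equal_sl2_vacuum_dim_py := by
  intro n _ hpre
  have hn0 : (0 : Int) ≤ n := hpre
  unfold Spec_sl2_vacuum_dim_py
  by_cases h0 : n = 0
  · subst h0; decide
  · unfold sl2_vacuum_dim_py sl2_vacuum_dim_py_alt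
    rw [if_neg h0]
    simp only []
    congr 1
    have hc0 : (PySem.List.pySetD (PySem.List.pyRepeat [(0 : Int)] (n + 1)) 0 1).length
        = (n + 1).toNat := by
      rw [PySem.List.pyRepeat_singleton]
      rw [show ((0 : Int)) = ((0 : Nat) : Int) from rfl, PySem.List.pySetD_natCast]
      rw [List.length_set, List.length_replicate]
    exact foldl_eq_of_inv _ (fun x => x.length = (n + 1).toNat) _ _
      (fun m hm x hx => by
        have hm1 : 1 ≤ m := (PySem.List.mem_pyRange_one.mp hm).1
        refine ⟨pass_eq n hn0 m hm1 x hx, ?_⟩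
        show _ = (n + 1).toNat
        rw [pass_eq n hn0 m hm1 x hx]
        set N : Nat := (n + 1).toNat with hN
        have hNn : ((N : Nat) : Int) = n + 1 := Int.toNat_of_nonneg (by omega)
        have hmN : ((m.toNat : Nat) : Int) = m := Int.toNat_of_nonneg (by omega)
        rw [← hNn, ← hmN]
        exact (passB_spec m.toNat N (by omega) x hx N le_rfl).1) _ hc0
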